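-- pv_equiv track=rewrite | github.com/Shosta/Report-Creation-on-Python | CreateReviewFile.py | substring_from
-- ===== SOURCE A (Python) =====
-- def substring_from(string, separator, index):
--     """Retrieve the string from a larger string splitted regarding the separator
--     and returning the indexed one.
--     """
--
--     liste = string.split(separator)
--     object_name = ""
--     try:
--         object_name = liste[index]
--     except IndexError:
--         if index-1 >= 0:
--             object_name = substring_from(string, separator, index-1)
--
--
--     return object_name
-- ===== SOURCE B (Python) =====
-- def substring_from(string, separator, index):
--     """Retrieve the string from a larger string splitted regarding the separator
--     and returning the indexed one.
--     """
--     liste = string.split(separator)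
--     n = len(liste)
--     if -n <= index < n:
--         return liste[index]
--     if index >= n:
--         return liste[-1]
--     return ""
-- ===== Notes on version B (the rewrite author's own statement) =====
-- stated objective: simpler
-- what changed: Replaces A's recursive index-decrementing with exception handling by a single split followed by a direct range check that clamps overflowing indices to the last element and returns "" for out-of-range negative indices.
import Mathlib
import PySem

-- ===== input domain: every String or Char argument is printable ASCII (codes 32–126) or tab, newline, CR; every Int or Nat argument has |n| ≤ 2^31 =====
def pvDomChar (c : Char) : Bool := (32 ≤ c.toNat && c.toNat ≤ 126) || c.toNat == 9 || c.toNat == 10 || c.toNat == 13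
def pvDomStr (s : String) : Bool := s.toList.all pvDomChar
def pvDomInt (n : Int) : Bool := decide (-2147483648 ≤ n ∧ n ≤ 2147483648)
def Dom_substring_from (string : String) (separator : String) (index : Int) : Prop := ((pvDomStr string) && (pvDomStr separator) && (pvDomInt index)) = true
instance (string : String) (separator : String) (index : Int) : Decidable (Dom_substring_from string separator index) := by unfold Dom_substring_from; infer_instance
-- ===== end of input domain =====

-- B replaces A's recursive index-decrement (catching IndexError) by one split and a direct
-- range check clamping overflowing indices to the last element; objective: simpler.
-- ===== PORT A =====
def substring_from (string : String) (separator : String) (index : Int) : String :=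
  match PySem.Str.split? string separator with
  | none => ""  -- separator == "": Python raises ValueError; excluded by Pre_
  | some liste =>
    match PySem.List.pyGet? liste index with
    | some s => s
    | none =>
      if h : index - 1 ≥ 0 then substring_from string separator (index - 1) else ""
termination_by index.toNat
decreasing_by omega

-- ===== PORT B =====
def substring_from_alt (string : String) (separator : String) (index : Int) : String :=
  match PySem.Str.split? string separator with
  | none => ""  -- separator == "": Python raises ValueError; excluded by Pre_
  | some liste =>
    let n : Int := liste.length
    if -n ≤ index ∧ index < n then (PySem.List.pyGet? liste index).getD ""
    else if index ≥ n then (PySem.List.pyGet? liste (-1)).getD ""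
    else ""

-- ===== PRECONDITION & SPEC =====
-- Pre_ excludes only separator = "", on which Python's str.split raises ValueError (in A and in B alike).
def Pre_substring_from (string : String) (separator : String) (index : Int) : Prop := separator ≠ ""
instance (string : String) (separator : String) (index : Int) : Decidable (Pre_substring_from string separator index) := by unfold Pre_substring_from; infer_instance
def pvWitness_substring_from : String × String × Int := ("a,b,c", ",", 1)
def Spec_substring_from (string : String) (separator : String) (index : Int) (out : String) : Prop := out = substring_from_alt string separator index
instance (string : String) (separator : String) (index : Int) (out : String) : Decidable (Spec_substring_from string separator index out) := by unfold Spec_substring_from; infer_instance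

-- ===== CLAIM (what is proved, stated in full; the proofs are below) =====
def Claim_equal_substring_from : Prop := ∀ (string : String) (separator : String) (index : Int), Dom_substring_from string separator index → Pre_substring_from string separator index → Spec_substring_from string separator index (substring_from string separator index)

-- ===== LEMMAS AND PROOFS =====
lemma split_some (s sep : String) (h : sep ≠ "") :
    ∃ l, PySem.Str.split? s sep = some l := by
  simp [PySem.Str.split?, PySem.Chars.split?, h]

lemma key (string separator : String) (hsep : separator ≠ "") :
    ∀ k (index : Int), index.toNat = k →
      substring_from string separator index = substring_from_alt string separator index := by
  intro k
  induction k using Nat.strong_induction_on with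
  | _ k ih =>
    intro index hk
    obtain ⟨liste, hl⟩ := split_some string separator hsep
    rw [substring_from, substring_from_alt, hl]
    simp only []
    cases hg : PySem.List.pyGet? liste index with
    | some s =>
      have hr : PySem.Raise.InRange liste.length index := by
        by_contra h
        rw [(PySem.List.pyGet?_eq_none_iff liste index).2 h] at hg
        simp at hg
      simp only [PySem.Raise.InRange] at hr
      rw [if_pos (by exact_mod_cast hr)]
      rfl
    | none =>
      have hr : ¬ PySem.Raise.InRange liste.length index :=
        (PySem.List.pyGet?_eq_none_iff liste index).1 hg
      simp only [PySem.Raise.InRange, not_and, not_lt] at hr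
      rw [if_neg (by push Not; intro h1; exact_mod_cast hr (by exact_mod_cast h1))]
      by_cases hpos : index - 1 ≥ 0
      · rw [dif_pos hpos]
        have hge : index ≥ (liste.length : Int) := by
          by_contra hlt
          push Not at hlt
          have := hr (by omega)
          omega
        rw [if_pos (by omega)]
        have hrec := ih (index - 1).toNat (by omega) (index - 1) rfl
        rw [hrec, substring_from_alt, hl]
        simp only []
        by_cases hge' : index - 1 ≥ (liste.length : Int)
        · rw [if_neg (by omega), if_pos hge']
        · -- index = liste.length, index - 1 = liste.length - 1, in range
          have hlen : 1 ≤ liste.length := by omega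
          rw [if_pos (by constructor <;> omega)]
          have h1 : PySem.List.pyGet? liste (index - 1) =
              some liste[liste.length - 1] := by
            have hi : (index - 1).toNat = liste.length - 1 := by omega
            rw [PySem.List.pyGet?_eq_some_getElem liste (i := index - 1) (by omega) (by omega)]
            simp only [hi]
          have h2 : PySem.List.pyGet? liste (-1) = liste.getLast? :=
            PySem.List.pyGet?_neg_one liste
          rw [h1, h2, List.getLast?_eq_getElem?]
          simp [List.getElem?_eq_getElem (by omega : liste.length - 1 < liste.length)]
      · rw [dif_neg hpos]
        by_cases hge : index ≥ (liste.length : Int)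
        · rw [if_pos hge]
          have hnil : liste = [] := by
            have := List.length_eq_zero_iff.1 (by omega : liste.length = 0)
            exact this
          subst hnil
          rfl
        · rw [if_neg hge]

lemma main_eq (string separator : String) (index : Int) (hsep : separator ≠ "") :
    Spec_substring_from string separator index (substring_from string separator index) := by
  unfold Spec_substring_from
  exact key string separator hsep index.toNat index rfl

-- ===== VERDICT (by name: the statement is the Claim_ definition above) =====
theorem substring_from_spec : Claim_equal_substring_from := by
  intro string separator index _ hpre
  exact main_eq string separator index hpre
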